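-- pv_equiv track=rewrite | github.com/rohanzonneveld/python-for-text-analysis | Assignments/ASSIGNMENT_4_ROHAN_ZONNEVELD/ted_translation_analysis.py | map_nlang_to_talks
-- ===== SOURCE A (Python) =====
-- def map_nlang_to_talks(id_to_languages):
--     '''
--     * input: dict mapping talk id to languages that talk is translated into
--     * output: dict mapping amount of languages talks are translated into to their corresponding talk ids
--
--     This function creates a dict mapping the amount of languages talks are translated into to their corresponding talk ids.
--     '''
--     # initialize empty dict
--     nlang_to_talks = {}
--     # loop over all talkIDs
--     for id in id_to_languages.keys():
--         # get amount of languages that talk is translated into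
--         n_languages = len(id_to_languages[id])
--         # create new key if n_languages is not in dict yet
--         if n_languages not in nlang_to_talks.keys():
--             nlang_to_talks[n_languages] = [id]
--         # add talkID to list of talkIDs if n_languages is already in dict
--         else:
--             nlang_to_talks[n_languages].append(id)
--
--     return nlang_to_talks
-- ===== SOURCE B (Python) =====
-- def map_nlang_to_talks(id_to_languages):
--     '''
--     * input: dict mapping talk id to languages that talk is translated into
--     * output: dict mapping amount of languages talks are translated into to their corresponding talk ids
--     '''
--     # one flat pass to (id, count) pairs, then one comprehension per distinct count
--     counts = [(talk_id, len(langs)) for talk_id, langs in id_to_languages.items()]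
--     order = dict.fromkeys(n for _, n in counts)  # distinct counts in first-occurrence order
--     return {n: [i for i, m in counts if m == n] for n in order}
-- ===== Notes on version B (the rewrite author's own statement) =====
-- stated objective: alternative
-- what changed: A builds the result in one pass by appending into a mutable dict; B first materialises (id, count) pairs, deduplicates the counts in first-occurrence order with dict.fromkeys, and builds each bucket by an independent filtering comprehension over the pairs.
import Mathlib
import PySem

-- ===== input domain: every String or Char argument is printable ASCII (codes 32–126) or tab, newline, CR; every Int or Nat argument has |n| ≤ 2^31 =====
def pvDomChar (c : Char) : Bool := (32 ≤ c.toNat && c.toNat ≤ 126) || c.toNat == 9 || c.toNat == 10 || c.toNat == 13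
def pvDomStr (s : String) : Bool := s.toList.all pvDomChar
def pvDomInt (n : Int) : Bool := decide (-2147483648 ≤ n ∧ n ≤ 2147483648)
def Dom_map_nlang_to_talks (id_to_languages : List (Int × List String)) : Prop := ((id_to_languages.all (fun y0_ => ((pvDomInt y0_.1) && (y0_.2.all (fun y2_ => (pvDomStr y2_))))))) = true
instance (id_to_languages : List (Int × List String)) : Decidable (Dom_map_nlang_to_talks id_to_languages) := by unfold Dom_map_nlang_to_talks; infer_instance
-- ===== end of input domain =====

-- B replaces A's single mutable-dict pass by pairs + ordered key dedup + one filter per distinct count (alternative decomposition, not claimed faster).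


-- ===== PORT A =====
-- the input dict is the association list; the loop over keys with id_to_languages[id] visits exactly its pairs in order
def map_nlang_to_talks (id_to_languages : List (Int × List String)) : List (Int × List Int) :=
  (id_to_languages.foldl
    (fun (nlang_to_talks : PySem.Dict Int (List Int)) p =>
      let n_languages : Int := (p.2.length : Int)
      if nlang_to_talks.contains n_languages = false then
        nlang_to_talks.insert n_languages [p.1]
      else
        nlang_to_talks.modify n_languages [] (fun v => v ++ [p.1]))
    PySem.Dict.empty).items

-- ===== PORT B =====
def map_nlang_to_talks_alt (id_to_languages : List (Int × List String)) : List (Int × List Int) :=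
  let counts := id_to_languages.map (fun p => (p.1, (p.2.length : Int)))
  let order := PySem.Set.ofList (counts.map (fun q => q.2))  -- dict.fromkeys: distinct counts, first-occurrence order
  order.map (fun n => (n, (counts.filter (fun q => q.2 == n)).map (fun q => q.1)))

-- ===== PRECONDITION & SPEC =====
def Spec_map_nlang_to_talks (id_to_languages : List (Int × List String)) (out : List (Int × List Int)) : Prop := out = map_nlang_to_talks_alt id_to_languages
instance (id_to_languages : List (Int × List String)) (out : List (Int × List Int)) : Decidable (Spec_map_nlang_to_talks id_to_languages out) := by unfold Spec_map_nlang_to_talks; infer_instance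

-- ===== CLAIM (what is proved, stated in full; the proofs are below) =====
def Claim_equal_map_nlang_to_talks : Prop := ∀ (id_to_languages : List (Int × List String)), Dom_map_nlang_to_talks id_to_languages → Spec_map_nlang_to_talks id_to_languages (map_nlang_to_talks id_to_languages)

-- ===== LEMMAS AND PROOFS =====

-- A's branch (insert fresh key / append to existing value) is exactly Dict.modify with default []
theorem pv_stepA_eq_modify (d : PySem.Dict Int (List Int)) (n i : Int) :
    (if d.contains n = false then d.insert n [i] else d.modify n [] (fun v => v ++ [i]))
      = d.modify n [] (fun v => v ++ [i]) := by
  by_cases h : d.contains n = false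
  · simp [h, PySem.Dict.modify, PySem.Dict.getD_of_not_contains d [] h]
  · simp [h]

theorem map_nlang_to_talks_eq_alt (l : List (Int × List String)) :
    map_nlang_to_talks l = map_nlang_to_talks_alt l := by
  unfold map_nlang_to_talks map_nlang_to_talks_alt
  have hstep : (fun (d : PySem.Dict Int (List Int)) (p : Int × List String) =>
      let n_languages : Int := (p.2.length : Int)
      if d.contains n_languages = false then d.insert n_languages [p.1]
      else d.modify n_languages [] (fun v => v ++ [p.1]))
      = fun (d : PySem.Dict Int (List Int)) (p : Int × List String) =>
          d.modify ((p.2.length : Int)) [] (fun v => v ++ [p.1]) := by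
    funext d p
    exact pv_stepA_eq_modify d ((p.2.length : Int)) p.1
  rw [hstep]
  have hfm : List.foldl (fun (d : PySem.Dict Int (List Int)) (p : Int × List String) =>
        d.modify ((p.2.length : Int)) [] (fun v => v ++ [p.1])) PySem.Dict.empty l
      = List.foldl (fun (d : PySem.Dict Int (List Int)) (q : Int × Int) =>
          d.modify q.1 [] (fun v => v ++ [q.2])) PySem.Dict.empty
          (l.map (fun p : Int × List String => (((p.2.length : Int)), p.1))) := by
    rw [List.foldl_map]
  rw [hfm]
  have hnd : ((l.map (fun p : Int × List String => (((p.2.length : Int)), p.1))).foldl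
      (fun (d : PySem.Dict Int (List Int)) (q : Int × Int) => d.modify q.1 [] (fun v => v ++ [q.2]))
      PySem.Dict.empty).keys.Nodup := by
    exact PySem.Dict.nodup_keys_foldl_modify_key _ Prod.fst [] (fun _ q v => v ++ [q.2]) _
      PySem.Dict.nodup_keys_empty
  rw [PySem.Dict.items_eq_map_keys _ hnd []]
  have hk := PySem.Dict.keys_foldl_modify_key
      (l.map (fun p : Int × List String => (((p.2.length : Int)), p.1))) Prod.fst []
      (fun _ q v => v ++ [q.2]) PySem.Dict.empty
  rw [hk, PySem.Dict.keys_empty, PySem.Set.update_nil_left]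
  simp only [List.map_map]
  refine List.map_congr_left ?_
  intro n hn
  rw [PySem.Dict.getD_foldl_modify_append, PySem.Dict.getD_empty]
  simp [List.filter_map, List.map_map, Function.comp_def]

-- ===== VERDICT (by name: the statement is the Claim_ definition above) =====
theorem map_nlang_to_talks_spec : Claim_equal_map_nlang_to_talks := by
  intro l _
  show map_nlang_to_talks l = map_nlang_to_talks_alt l
  exact map_nlang_to_talks_eq_alt l
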